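-- pv_equiv track=rewrite | github.com/mak7eim/453503_PRATSKO_24 | IGI/LR3/task5.py | sum_before_last_zero
-- ===== SOURCE A (Python) =====
-- def sum_before_last_zero(lst: list[int]) -> int | None:
--     """
--     Return the sum of all elements that appear before the last zero.
--
--     Args:
--         lst: List of integers.
--
--     Returns:
--         Sum of elements before the last zero element, or None if no zero exists.
--         Returns 0 if the last zero is the first element.
--     """
--     last_zero_idx = None
--     for i in range(len(lst) - 1, -1, -1):
--         if lst[i] == 0:
--             last_zero_idx = i
--             break
--
--     if last_zero_idx is None:
--         return None
--
--     return sum(lst[:last_zero_idx])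
-- ===== SOURCE B (Python) =====
-- def sum_before_last_zero(lst):
--     running_sum = 0
--     result = None
--     for x in lst:
--         if x == 0:
--             result = running_sum
--         running_sum += x
--     return result
-- ===== Notes on version B (the rewrite author's own statement) =====
-- stated objective: simpler
-- what changed: Replaced the backward index scan plus slice-and-sum with a single forward pass keeping a running sum and recording it whenever a zero is seen, removing the index, slice and second pass.
import Mathlib
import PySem

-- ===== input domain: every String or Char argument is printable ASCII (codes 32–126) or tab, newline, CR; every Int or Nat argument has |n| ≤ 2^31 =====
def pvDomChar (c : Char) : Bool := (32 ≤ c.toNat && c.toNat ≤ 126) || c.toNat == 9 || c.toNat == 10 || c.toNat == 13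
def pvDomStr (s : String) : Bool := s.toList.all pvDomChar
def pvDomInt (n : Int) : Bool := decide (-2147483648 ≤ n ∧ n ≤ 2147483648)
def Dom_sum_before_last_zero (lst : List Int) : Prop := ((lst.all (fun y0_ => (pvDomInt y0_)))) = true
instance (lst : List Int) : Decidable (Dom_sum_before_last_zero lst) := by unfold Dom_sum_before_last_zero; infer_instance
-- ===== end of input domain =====

-- B is a single forward pass with a running sum instead of A's backward index scan plus slice-and-sum (objective: simpler).

-- ===== PORT A =====
-- A's loop 'for i in range(len(lst)-1, -1, -1): if lst[i] == 0: last_zero_idx = i; break'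
-- iterates i = n-1, n-2, …, 0 and stops at the first zero found; ported as recursion on the
-- remaining counter: pvGoA lst (i+1) tests index i and continues with pvGoA lst i.
-- lst[i] with 0 ≤ i < len(lst) is exactly lst[i]? = some v.
def pvGoA (lst : List Int) : Nat → Option Nat
  | 0 => none
  | (i+1) => if lst[i]? = some 0 then some i else pvGoA lst i

-- sum(lst[:i]) with 0 ≤ i ≤ len(lst) is exactly (lst.take i).sum.
def sum_before_last_zero (lst : List Int) : Option Int :=
  match pvGoA lst lst.length with
  | none => none
  | some i => some ((lst.take i).sum)

-- ===== PORT B =====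
-- state = (running_sum, result); for each x: if x == 0 record running_sum, then add x.
def sum_before_last_zero_alt (lst : List Int) : Option Int :=
  (lst.foldl (fun st x =>
      (st.1 + x, if x = 0 then some st.1 else st.2)) ((0 : Int), (none : Option Int))).2

-- ===== PRECONDITION & SPEC =====
def Spec_sum_before_last_zero (lst : List Int) (out : Option Int) : Prop := out = sum_before_last_zero_alt lst
instance (lst : List Int) (out : Option Int) : Decidable (Spec_sum_before_last_zero lst out) := by unfold Spec_sum_before_last_zero; infer_instance

-- ===== CLAIM (what is proved, stated in full; the proofs are below) =====
def Claim_equal_sum_before_last_zero : Prop := ∀ (lst : List Int), Dom_sum_before_last_zero lst → Spec_sum_before_last_zero lst (sum_before_last_zero lst)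

-- ===== LEMMAS AND PROOFS =====

theorem pvGoA_append (lst : List Int) (x : Int) (n : Nat) (h : n ≤ lst.length) :
    pvGoA (lst ++ [x]) n = pvGoA lst n := by
  induction n with
  | zero => rfl
  | succ i ih =>
    have hi : i < lst.length := h
    simp [pvGoA, List.getElem?_append_left hi, ih (Nat.le_of_lt hi)]

theorem pvGoA_lt (lst : List Int) (n : Nat) (i : Nat) (h : pvGoA lst n = some i) : i < n := by
  induction n with
  | zero => simp [pvGoA] at h
  | succ m ih =>
    unfold pvGoA at h
    split at h
    · injection h with h; omega
    · exact Nat.lt_succ_of_lt (ih h)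

theorem pvGoA_top (lst : List Int) (x : Int) :
    pvGoA (lst ++ [x]) (lst.length + 1) =
      if x = 0 then some lst.length else pvGoA lst lst.length := by
  by_cases hx : x = 0
  · simp [pvGoA, hx]
  · simp [pvGoA, hx, pvGoA_append lst x lst.length (Nat.le_refl _)]

theorem A_snoc (lst : List Int) (x : Int) :
    sum_before_last_zero (lst ++ [x]) =
      if x = 0 then some lst.sum else sum_before_last_zero lst := by
  simp only [sum_before_last_zero, List.length_append, List.length_cons,
    List.length_nil, Nat.zero_add, pvGoA_top]
  by_cases hx : x = 0
  · simp [hx, List.take_append_of_le_length (Nat.le_refl lst.length)]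
  · rw [if_neg hx, if_neg hx]
    cases hgo : pvGoA lst lst.length with
    | none => simp
    | some i =>
      have hi := pvGoA_lt lst lst.length i hgo
      simp [List.take_append_of_le_length (Nat.le_of_lt hi)]

theorem B_fst (lst : List Int) (s : Int) (r : Option Int) :
    (lst.foldl (fun st x => (st.1 + x, if x = 0 then some st.1 else st.2)) (s, r)).1
      = s + lst.sum := by
  induction lst generalizing s r with
  | nil => simp
  | cons y ys ih => simp [List.foldl, ih]; ring

theorem B_snoc (lst : List Int) (x : Int) :
    sum_before_last_zero_alt (lst ++ [x]) =
      if x = 0 then some lst.sum else sum_before_last_zero_alt lst := by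
  unfold sum_before_last_zero_alt
  rw [List.foldl_append]
  by_cases hx : x = 0
  · simp [hx, B_fst]
  · simp [hx]

-- ===== VERDICT (by name: the statement is the Claim_ definition above) =====
theorem AB_eq (lst : List Int) : sum_before_last_zero lst = sum_before_last_zero_alt lst := by
  induction lst using List.reverseRecOn with
  | nil => rfl
  | append_singleton ys x ih => rw [A_snoc, B_snoc, ih]

theorem sum_before_last_zero_spec : Claim_equal_sum_before_last_zero := by
  intro lst _
  exact AB_eq lst
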